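-- pv_equiv track=rewrite | github.com/ThisSentenceIsALie/Wirt_Hm | Wirt_Hm_Suite_Python/gauss_processor.py | process_gauss_code
-- ===== SOURCE A (Python) =====
-- def process_gauss_code(raw_gauss_code):
--     #Initialize variables
--     prev_char_int=0
--     cur_entry=''
--     code=list()
--     #Run through every character in the string version of the gauss code
--     for char in raw_gauss_code:
--         #Try to convert the character to an integer. If it happens to be a negative, send it on through anyway
--         try:
--             if char != '-':
--                 int(char)
--         #If that dosen't work, then this character is not part of a code element; it is a beginning, end, or speration character
--         except:
--             #If the previous character was an integer...
--             if prev_char_int==1: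
--                 #Then the current value of cur_entry is a code element. Turn it into a number and stick it in the integer code
--                 code.append(int(cur_entry))
--                 #Reset cur_entry
--                 cur_entry=''
--             #Set the value of "was the last entry an integer" to "no"
--             prev_char_int=0
--         #Otherwise, the character is either an integer or a negative sign
--         else:
--             #In either case, add it to the current entry
--             cur_entry+=char
--             #Set the value of "was the last entry an integer" to "yes"
--             prev_char_int=1
--     #If the end of the gauss code has been reached and there is still a new entry being built...
--     if len(cur_entry) !=0:
--         #Add that entry to the integer list
--         code.append(int(cur_entry))
--     #return the integer list version of the code
--     return code
-- ===== SOURCE B (Python) =====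
-- def process_gauss_code(raw_gauss_code):
--     # Blank out every character that is not part of a code token (digits / '-'),
--     # then let str.split() produce the maximal token runs and int() each one.
--     cleaned = ''.join(c if c == '-' or c.isdecimal() else ' ' for c in raw_gauss_code)
--     return [int(t) for t in cleaned.split()]
-- ===== Notes on version B (the rewrite author's own statement) =====
-- stated objective: simpler
-- what changed: Replaced the hand-written character state machine (prev_char_int flag, cur_entry accumulator, try/except per character) by a mask-and-split pipeline: blank out every non-token character, let str.split() yield the maximal digit/'-' runs, and int() each token.
-- outside the precondition, e.g. on process_gauss_code('-'): A raises ValueError, B raises ValueError; on process_gauss_code('1-2'): A raises ValueError, B raises ValueError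
import Mathlib
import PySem

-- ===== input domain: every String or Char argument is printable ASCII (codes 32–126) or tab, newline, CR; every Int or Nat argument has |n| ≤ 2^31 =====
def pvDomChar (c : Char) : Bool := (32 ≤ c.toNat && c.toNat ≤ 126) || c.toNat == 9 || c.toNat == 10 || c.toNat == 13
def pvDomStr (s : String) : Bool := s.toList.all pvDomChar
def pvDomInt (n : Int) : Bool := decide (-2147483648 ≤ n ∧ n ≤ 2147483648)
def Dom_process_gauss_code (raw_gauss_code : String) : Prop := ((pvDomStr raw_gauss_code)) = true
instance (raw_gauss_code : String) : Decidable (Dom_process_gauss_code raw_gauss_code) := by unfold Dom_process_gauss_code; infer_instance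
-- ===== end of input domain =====

-- B replaces A's hand-written flush/accumulate state machine by a mask-and-split pipeline
-- (blank out non-token characters, str.split(), int() each token) — objective: simpler/idiomatic.

-- int(t): exact via PySem; the .getD 0 default is never reached under Pre_ (Python raises there)
def pvInt (cs : List Char) : Int := (PySem.Int.ofChars? cs).getD 0

-- ===== PORT A =====
-- the loop body: token characters ('-' or a digit — within the ASCII domain int(char)
-- succeeds exactly on '0'..'9') are appended to cur_entry; anything else flushes
def pvStepA (st : Nat × List Char × List Int) (c : Char) : Nat × List Char × List Int :=
  if c == '-' || c.isDigit then
    (1, st.2.1 ++ [c], st.2.2)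
  else
    if st.1 == 1 then (0, [], st.2.2 ++ [pvInt st.2.1])
    else (0, st.2.1, st.2.2)

def process_gauss_code (raw_gauss_code : String) : List Int :=
  let st := raw_gauss_code.toList.foldl pvStepA (0, [], [])
  if st.2.1.length ≠ 0 then st.2.2 ++ [pvInt st.2.1] else st.2.2

-- ===== PORT B =====
-- `c.isdecimal()` is `c.isDigit` on the ASCII domain
def pvMask (c : Char) : Char := if c == '-' || c.isDigit then c else ' '

def process_gauss_code_alt (raw_gauss_code : String) : List Int :=
  (PySem.Chars.split₀ (raw_gauss_code.toList.map pvMask)).map pvInt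

-- ===== PRECONDITION & SPEC =====
-- Pre_ excludes exactly the inputs on which Python A raises ValueError from int():
-- a '-' that is preceded by a token character or not immediately followed by a digit
-- makes its token fail int() (e.g. "1-2", "-", "a--1").
def Pre_process_gauss_code (raw_gauss_code : String) : Prop :=
  ∀ i, i < raw_gauss_code.toList.length →
    raw_gauss_code.toList.getD i ' ' = '-' →
    ((i = 0 ∨ ¬(raw_gauss_code.toList.getD (i-1) ' ' == '-'
                 || (raw_gauss_code.toList.getD (i-1) ' ').isDigit) = true)
      ∧ i + 1 < raw_gauss_code.toList.length
      ∧ (raw_gauss_code.toList.getD (i+1) ' ').isDigit = true)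
instance (raw_gauss_code : String) : Decidable (Pre_process_gauss_code raw_gauss_code) := by
  unfold Pre_process_gauss_code; infer_instance

def pvWitness_process_gauss_code : String := "1 -2, 3 -4"

def Spec_process_gauss_code (raw_gauss_code : String) (out : List Int) : Prop := out = process_gauss_code_alt raw_gauss_code
instance (raw_gauss_code : String) (out : List Int) : Decidable (Spec_process_gauss_code raw_gauss_code out) := by unfold Spec_process_gauss_code; infer_instance

-- ===== CLAIM (what is proved, stated in full; the proofs are below) =====
def Claim_equal_process_gauss_code : Prop := ∀ (raw_gauss_code : String), Dom_process_gauss_code raw_gauss_code → Pre_process_gauss_code raw_gauss_code → Spec_process_gauss_code raw_gauss_code (process_gauss_code raw_gauss_code)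

-- ===== LEMMAS AND PROOFS =====

lemma pv_isspace_of_tok (c : Char) (h : (c == '-' || c.isDigit) = true) :
    PySem.Chars.isspace c = false := by
  by_cases h1 : c = '-'
  · subst h1; decide
  · have h2 : c.isDigit = true := by simpa [h1] using h
    simp only [Char.isDigit, Bool.and_eq_true, decide_eq_true_eq] at h2
    have hl' := (UInt32.le_iff_toNat_le).mp h2.1
    have hu' := (UInt32.le_iff_toNat_le).mp h2.2
    have e0 : ('0'.val).toNat = 48 := by decide
    have e9 : ('9'.val).toNat = 57 := by decide
    rw [e0] at hl'
    rw [e9] at hu'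
    have hl : 48 ≤ c.toNat := hl'
    have hu : c.toNat ≤ 57 := hu'
    simp only [PySem.Chars.isspace]
    simp only [Bool.or_eq_false_iff, Bool.and_eq_false_iff, decide_eq_false_iff_not]
    omega

-- the accumulator of split₀.go only collects already-finished tokens
lemma pv_go_acc (l : List Char) : ∀ (cur : List Char) (acc : List (List Char)),
    PySem.Chars.split₀.go l cur acc = acc.reverse ++ PySem.Chars.split₀.go l cur [] := by
  induction l with
  | nil =>
    intro cur acc
    simp only [PySem.Chars.split₀.go]
    by_cases h : cur.isEmpty <;> simp [h]
  | cons c rest ih =>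
    intro cur acc
    simp only [PySem.Chars.split₀.go]
    by_cases hs : PySem.Chars.isspace c
    · by_cases h : cur.isEmpty
      · simp only [hs, h, if_true]
        exact ih [] acc
      · simp only [hs, if_true]
        have hE : cur.isEmpty = false := by simpa using h
        simp only [hE, Bool.false_eq_true, if_false]
        rw [ih [] (cur.reverse :: acc), ih [] [cur.reverse]]
        simp
    · have hS : PySem.Chars.isspace c = false := by simpa using hs
      simp only [hS, Bool.false_eq_true, if_false]
      exact ih (c :: cur) acc

-- the central invariant: A's fold from state (prev, cur, code) finishes exactly like
-- B's split of the masked remainder, with cur as the token under construction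
lemma pv_key (l : List Char) : ∀ (cur : List Char) (code : List Int),
    (let st := l.foldl pvStepA ((if cur.isEmpty then 0 else 1), cur, code)
     if st.2.1.length ≠ 0 then st.2.2 ++ [pvInt st.2.1] else st.2.2)
    = code ++ (PySem.Chars.split₀.go (l.map pvMask) cur.reverse []).map pvInt := by
  induction l with
  | nil =>
    intro cur code
    simp only [List.foldl_nil, List.map_nil, PySem.Chars.split₀.go]
    by_cases h : cur.isEmpty
    · have : cur = [] := List.isEmpty_iff.mp h
      subst this; simp
    · have hne : cur ≠ [] := fun hh => h (by simp [hh])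
      simp [h, hne, List.length_eq_zero_iff]
  | cons c rest ih =>
    intro cur code
    by_cases htok : (c == '-' || c.isDigit) = true
    · -- token character: appended to cur_entry, and not a space in the masked string
      have hmask : pvMask c = c := by simp [pvMask, htok]
      have hsp : PySem.Chars.isspace c = false := pv_isspace_of_tok c htok
      simp only [List.foldl_cons, List.map_cons, hmask, PySem.Chars.split₀.go, hsp,
        Bool.false_eq_true, if_false]
      have hstep : pvStepA ((if cur.isEmpty then 0 else 1), cur, code) c
          = (1, cur ++ [c], code) := by
        simp [pvStepA, htok]
      rw [hstep]
      have h1 : (if (cur ++ [c]).isEmpty then (0:Nat) else 1) = 1 := by simp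
      have := ih (cur ++ [c]) code
      rw [h1] at this
      rw [this]
      simp
    · -- separator character: masked to ' ', flushes cur_entry if nonempty
      have hmask : pvMask c = ' ' := by simp [pvMask, htok]
      have hsp : PySem.Chars.isspace ' ' = true := by decide
      simp only [List.foldl_cons, List.map_cons, hmask, PySem.Chars.split₀.go, hsp, if_true]
      by_cases h : cur.isEmpty
      · have hc : cur = [] := List.isEmpty_iff.mp h
        subst hc
        have hstep : pvStepA ((if ([]:List Char).isEmpty then 0 else 1), [], code) c
            = (0, [], code) := by
          simp [pvStepA, htok]
        rw [hstep]
        have := ih [] code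
        simpa using this
      · have hne : cur ≠ [] := fun hh => h (by simp [hh])
        have hstep : pvStepA ((if cur.isEmpty then 0 else 1), cur, code) c
            = (0, [], code ++ [pvInt cur]) := by
          simp [pvStepA, htok, h]
        rw [hstep]
        have hrev : cur.reverse.isEmpty = false := by
          simp [hne]
        simp only [hrev, Bool.false_eq_true, if_false]
        have := ih [] (code ++ [pvInt cur])
        simp only [List.isEmpty_nil, if_true, List.reverse_nil] at this
        rw [this]
        rw [pv_go_acc _ [] [cur.reverse.reverse]]
        simp

-- ===== VERDICT (by name: the statement is the Claim_ definition above) =====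
theorem process_gauss_code_spec : Claim_equal_process_gauss_code := by
  intro s _ _
  unfold Spec_process_gauss_code process_gauss_code process_gauss_code_alt PySem.Chars.split₀
  have := pv_key s.toList [] []
  simpa using this
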